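-- pv_equiv track=rewrite | github.com/neizod/problems | acm/uva/12627-balloons.py | dq_count
-- ===== SOURCE A (Python) =====
-- def dq_count(hour, lower, upper):
--     if lower == upper:
--         return 0
--     if lower == 0 and upper == 2**hour:
--         return 3**hour
--     hour -= 1
--     lower_lower = min(lower, 2**hour)
--     lower_upper = min(upper, 2**hour)
--     upper_lower = max(lower, 2**hour) - 2**hour
--     upper_upper = max(upper, 2**hour) - 2**hour
--     lower_part = dq_count(hour, lower_lower, lower_upper)
--     upper_part = dq_count(hour, upper_lower, upper_upper)
--     return 2 * lower_part + upper_part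
-- ===== SOURCE B (Python) =====
-- def dq_count(hour, lower, upper):
--     if lower == upper:
--         return 0
--     def suffix(level, k):
--         # balloons in rows [k, 2**level) of a level-deep tree
--         if k == 2 ** level:
--             return 0
--         if k == 0:
--             return 3 ** level
--         half = 2 ** (level - 1)
--         if k >= half:
--             return suffix(level - 1, k - half)
--         return 2 * suffix(level - 1, k) + 3 ** (level - 1)
--     return suffix(hour, lower) - suffix(hour, upper)
-- ===== Notes on version B (the rewrite author's own statement) =====
-- stated objective: alternative
-- what changed: Replaces A's binary divide-and-conquer (splitting [lower,upper) at each midpoint and combining 2*lower_part+upper_part of two clipped sub-intervals) by a complement count along a single boundary path: suffix(level,k) counts rows [k,2^level) by walking one path down the tree, and the answer is suffix(hour,lower) - suffix(hour,upper).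
import Mathlib
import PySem

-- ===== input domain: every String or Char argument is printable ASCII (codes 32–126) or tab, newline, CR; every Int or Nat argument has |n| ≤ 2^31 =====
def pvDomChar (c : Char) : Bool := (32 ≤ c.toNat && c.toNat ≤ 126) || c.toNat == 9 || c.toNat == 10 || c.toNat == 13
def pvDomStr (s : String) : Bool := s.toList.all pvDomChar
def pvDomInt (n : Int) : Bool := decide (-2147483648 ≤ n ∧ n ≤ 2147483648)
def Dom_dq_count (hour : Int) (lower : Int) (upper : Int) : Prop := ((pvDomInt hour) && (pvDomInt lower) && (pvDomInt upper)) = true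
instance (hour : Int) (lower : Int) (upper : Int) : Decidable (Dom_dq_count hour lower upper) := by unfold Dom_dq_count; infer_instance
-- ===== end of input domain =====

-- B counts by a single boundary-path complement (suffix(hour,lower) - suffix(hour,upper)) instead of A's two-way divide-and-conquer; equivalence proved on the inputs where Python A returns.

-- ===== PORT A =====
-- A's recursion decreases hour by 1 each call; fuel = hour.toNat bounds the depth (inside Pre_ the
-- base cases always fire before fuel runs out, so the fuel guard only makes the recursion total).
def dq_count_go (fuel : Nat) (hour : Int) (lower : Int) (upper : Int) : Int :=
  if lower = upper then 0
  else if lower = 0 ∧ upper = 2 ^ hour.toNat then 3 ^ hour.toNat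
  else match fuel with
    | 0 => 0
    | fuel + 1 =>
      let hour' := hour - 1
      let m : Int := 2 ^ hour'.toNat
      let lower_lower := min lower m
      let lower_upper := min upper m
      let upper_lower := max lower m - m
      let upper_upper := max upper m - m
      let lower_part := dq_count_go fuel hour' lower_lower lower_upper
      let upper_part := dq_count_go fuel hour' upper_lower upper_upper
      2 * lower_part + upper_part

def dq_count (hour : Int) (lower : Int) (upper : Int) : Int :=
  dq_count_go hour.toNat hour lower upper

-- ===== PORT B =====
-- Source B's recursive suffix helper (rows [k, 2**level) of a level-deep tree); it descends level-1
-- each call, so fuel = hour.toNat bounds the depth (the fuel-out branch is unreachable on inputs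
-- where Python B returns: there the k = 0 / k = 2^level bases fire by level 0).
def pvSuffixGo (fuel : Nat) (level : Int) (k : Int) : Int :=
  if k = 2 ^ level.toNat then 0
  else if k = 0 then 3 ^ level.toNat
  else match fuel with
    | 0 => 0
    | f + 1 =>
      let half : Int := 2 ^ (level - 1).toNat
      if half ≤ k then pvSuffixGo f (level - 1) (k - half)
      else 2 * pvSuffixGo f (level - 1) k + 3 ^ (level - 1).toNat

def dq_count_alt (hour : Int) (lower : Int) (upper : Int) : Int :=
  if lower = upper then 0
  else pvSuffixGo hour.toNat hour lower - pvSuffixGo hour.toNat hour upper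

-- ===== PRECONDITION & SPEC =====
-- Pre_ admits exactly the inputs on which Python A returns a value: lower = upper (immediate 0) and
-- the proper domain 0 ≤ lower ≤ upper ≤ 2^hour with hour ≥ 0; everywhere else A recurses without
-- reaching a base case and raises RecursionError. The disjunct '31 ≤ hour ∨ …' is equivalent to
-- 'upper ≤ 2^hour' within the |int| ≤ 2^31 input domain (there upper ≤ 2^31 ≤ 2^hour when 31 ≤ hour);
-- it only avoids evaluating astronomically large powers and never excludes an input A returns on.
def Pre_dq_count (hour : Int) (lower : Int) (upper : Int) : Prop :=
  lower = upper ∨ (0 ≤ hour ∧ 0 ≤ lower ∧ lower ≤ upper ∧ (31 ≤ hour ∨ upper ≤ 2 ^ hour.toNat))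
instance (hour : Int) (lower : Int) (upper : Int) : Decidable (Pre_dq_count hour lower upper) := by unfold Pre_dq_count; infer_instance

def pvWitness_dq_count : Int × Int × Int := (2, 1, 3)

def Spec_dq_count (hour : Int) (lower : Int) (upper : Int) (out : Int) : Prop := out = dq_count_alt hour lower upper
instance (hour : Int) (lower : Int) (upper : Int) (out : Int) : Decidable (Spec_dq_count hour lower upper out) := by unfold Spec_dq_count; infer_instance

-- ===== CLAIM (what is proved, stated in full; the proofs are below) =====
def Claim_equal_dq_count : Prop := ∀ (hour : Int) (lower : Int) (upper : Int), Dom_dq_count hour lower upper → Pre_dq_count hour lower upper → Spec_dq_count hour lower upper (dq_count hour lower upper)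

-- ===== LEMMAS AND PROOFS =====

-- Recursive characterisation of the prefix count.
def pvF : Nat → Int → Int
  | 0, k => k
  | n + 1, k => if 2 ^ n ≤ k then 2 * 3 ^ n + pvF n (k - 2 ^ n) else 2 * pvF n k

theorem pvF_zero (n : Nat) : pvF n 0 = 0 := by
  induction n with
  | zero => rfl
  | succ n ih =>
    have h : ¬ ((2 : Int) ^ n ≤ 0) := not_le.mpr (pow_pos (by norm_num) n)
    simp [pvF, h, ih]

theorem pvF_full (n : Nat) : pvF n (2 ^ n) = 3 ^ n := by
  induction n with
  | zero => rfl
  | succ n ih =>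
    have h : (2 : Int) ^ n ≤ 2 ^ (n + 1) := by
      have h2 : (2:Int) ^ (n+1) = 2 ^ n * 2 := by ring
      nlinarith [pow_pos (by norm_num : (0:Int) < 2) n]
    have h2 : (2 : Int) ^ (n + 1) - 2 ^ n = 2 ^ n := by ring
    simp only [pvF, if_pos h, h2, ih]
    ring

-- The recursive suffix helper computes the complement 3^n - pvF (fuel never runs out for n ≤ fuel).
theorem pvSuffixGo_eq (n : Nat) : ∀ (fuel : Nat) (k : Int), n ≤ fuel → 0 ≤ k → k ≤ 2 ^ n →
    pvSuffixGo fuel (n : Int) k = 3 ^ n - pvF n k := by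
  induction n with
  | zero =>
    intro fuel k _ h0 h1
    have h1' : k ≤ 1 := by simpa using h1
    rw [pvSuffixGo.eq_def]
    interval_cases k <;> simp [pvF]
  | succ n ih =>
    intro fuel k hf h0 h1
    have hn : ((n : Int)).toNat = n := by simp
    have hn1 : ((↑(n + 1) : Int)).toNat = n + 1 := by simp
    have hA : ((↑(n + 1) : Int) - 1) = (n : Int) := by push_cast; ring
    rw [pvSuffixGo.eq_def]
    simp only [hn1]
    by_cases hfull : k = 2 ^ (n + 1)
    · rw [if_pos hfull, hfull, pvF_full]; ring
    · rw [if_neg hfull]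
      by_cases hzero : k = 0
      · rw [if_pos hzero, hzero, pvF_zero]; ring
      · rw [if_neg hzero]
        obtain ⟨f, rfl⟩ : ∃ f, fuel = f + 1 := ⟨fuel - 1, by omega⟩
        simp only [hA, hn]
        have hklt : k < 2 ^ (n + 1) := lt_of_le_of_ne h1 hfull
        have h2 : (2 : Int) ^ (n + 1) = 2 * 2 ^ n := by ring
        by_cases hk : (2 : Int) ^ n ≤ k
        · rw [if_pos hk, ih f _ (by omega) (by omega) (by omega)]
          simp only [pvF, if_pos hk]
          ring
        · rw [if_neg hk, ih f _ (by omega) h0 (le_of_lt (not_le.mp hk))]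
          simp only [pvF, if_neg hk]
          ring

-- Main lemma: A's recursion equals the prefix difference on the proper domain.
theorem dq_go_eq (n : Nat) : ∀ (fuel : Nat) (l u : Int), n ≤ fuel →
    0 ≤ l → l ≤ u → u ≤ 2 ^ n →
    dq_count_go fuel (n : Int) l u = pvF n u - pvF n l := by
  induction n with
  | zero =>
    intro fuel l u _ h0 hlu hu
    have hu1 : u ≤ 1 := by simpa using hu
    have hcase : (l = 0 ∧ u = 0) ∨ (l = 0 ∧ u = 1) ∨ (l = 1 ∧ u = 1) := by omega
    rw [dq_count_go.eq_def]
    rcases hcase with ⟨rfl, rfl⟩ | ⟨rfl, rfl⟩ | ⟨rfl, rfl⟩ <;> simp [pvF]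
  | succ n ih =>
    intro fuel l u hfuel h0 hlu hu
    have hn : ((n : Int)).toNat = n := by simp
    have hn1 : ((↑(n + 1) : Int)).toNat = n + 1 := by simp
    have hA : ((↑(n + 1) : Int) - 1) = (n : Int) := by push_cast; ring
    obtain ⟨f, rfl⟩ : ∃ f, fuel = f + 1 := ⟨fuel - 1, by omega⟩
    rw [dq_count_go.eq_def]
    by_cases hbase1 : l = u
    · rw [if_pos hbase1, hbase1]; ring
    · rw [if_neg hbase1]
      by_cases hbase2 : l = 0 ∧ u = 2 ^ ((↑(n + 1) : Int)).toNat
      · rw [if_pos hbase2, hn1]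
        rw [hn1] at hbase2
        rw [hbase2.1, hbase2.2, pvF_full, pvF_zero]
        ring
      · rw [if_neg hbase2]
        simp only [hA, hn]
        have hmpos : (0:Int) < 2 ^ n := pow_pos (by norm_num) n
        have h2n1 : (2 : Int) ^ (n + 1) = 2 * 2 ^ n := by ring
        have hfn : n ≤ f := by omega
        have e1 := ih f (min l (2 ^ n)) (min u (2 ^ n)) hfn (le_min h0 hmpos.le)
          (min_le_min hlu le_rfl) (min_le_right _ _)
        have e2 := ih f (max l (2 ^ n) - 2 ^ n) (max u (2 ^ n) - 2 ^ n) hfn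
          (by simp) (by simp only [sub_le_sub_iff_right]; exact max_le_max hlu le_rfl)
          (by rcases le_or_gt u (2 ^ n) with h | h
              · rw [max_eq_right h]; omega
              · rw [max_eq_left h.le]; omega)
        rw [e1, e2]
        rcases le_or_gt (2 ^ n : Int) l with hl | hl
        · -- both in the right half
          have hul : (2 ^ n : Int) ≤ u := le_trans hl hlu
          rw [min_eq_right hl, min_eq_right hul, max_eq_left hl, max_eq_left hul]
          have fl : pvF (n + 1) l = 2 * 3 ^ n + pvF n (l - 2 ^ n) := by
            simp only [pvF, if_pos hl]
          have fu : pvF (n + 1) u = 2 * 3 ^ n + pvF n (u - 2 ^ n) := by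
            simp only [pvF, if_pos hul]
          rw [fl, fu, pvF_full]
          ring
        · rcases le_or_gt u (2 ^ n) with hum | hum
          · -- both in the left half
            rw [min_eq_left hl.le, min_eq_left hum, max_eq_right hl.le, max_eq_right hum]
            have fl : pvF (n + 1) l = 2 * pvF n l := by
              simp only [pvF, if_neg (not_le.mpr hl)]
            have fu : pvF (n + 1) u = 2 * pvF n u := by
              rcases eq_or_lt_of_le hum with h | h
              · rw [h]
                simp only [pvF, if_pos le_rfl, sub_self, pvF_zero, pvF_full]
                ring
              · simp only [pvF, if_neg (not_le.mpr h)]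
            simp only [fl, fu, sub_self, pvF_zero]
            ring
          · -- straddling the midpoint
            rw [min_eq_left hl.le, min_eq_right hum.le, max_eq_right hl.le, max_eq_left hum.le]
            have fl : pvF (n + 1) l = 2 * pvF n l := by
              simp only [pvF, if_neg (not_le.mpr hl)]
            have fu : pvF (n + 1) u = 2 * 3 ^ n + pvF n (u - 2 ^ n) := by
              simp only [pvF, if_pos hum.le]
            simp only [fl, fu, pvF_full, sub_self, pvF_zero]
            ring

-- ===== VERDICT (by name: the statement is the Claim_ definition above) =====
theorem dq_count_spec : Claim_equal_dq_count := by
  intro hour lower upper hdom hpre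
  unfold Spec_dq_count dq_count dq_count_alt
  rcases hpre with heq | ⟨hh, h0, hlu, hcap⟩
  · subst heq
    rw [dq_count_go.eq_def]
    simp
  · by_cases heq : lower = upper
    · subst heq
      rw [dq_count_go.eq_def]
      simp
    · rw [if_neg heq]
      have hu : upper ≤ 2 ^ hour.toNat := by
        rcases hcap with h31 | h
        · have hdom' : upper ≤ 2147483648 := by
            simp only [Dom_dq_count, pvDomInt, Bool.and_eq_true, decide_eq_true_eq] at hdom
            omega
          calc upper ≤ 2147483648 := hdom'
            _ = 2 ^ (31 : Nat) := by norm_num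
            _ ≤ 2 ^ hour.toNat := pow_le_pow_right₀ (by norm_num) (by omega)
        · exact h
      obtain ⟨n, rfl⟩ : ∃ n : Nat, hour = (n : Int) := ⟨hour.toNat, (Int.toNat_of_nonneg hh).symm⟩
      have hn : ((n : Int)).toNat = n := by simp
      rw [hn] at hu ⊢
      rw [dq_go_eq n n lower upper le_rfl h0 hlu hu,
        pvSuffixGo_eq n n lower le_rfl h0 (le_trans hlu hu),
        pvSuffixGo_eq n n upper le_rfl (le_trans h0 hlu) hu]
      ring
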